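-- pv_equiv track=rewrite | github.com/rmcmillan34/edge-journal | api/app/routes_uploads.py | _unique_headers
-- ===== SOURCE A (Python) =====
-- from typing import Dict, List, Any
--
-- def _unique_headers(headers: List[str]) -> List[str]:
--     seen: dict[str, int] = {}
--     out: List[str] = []
--     for h in headers:
--         cnt = seen.get(h, 0) + 1
--         seen[h] = cnt
--         if cnt == 1:
--             out.append(h)
--         else:
--             out.append(f"{h}[{cnt}]")
--     return out
-- ===== SOURCE B (Python) =====
-- from typing import List
--
-- def _unique_headers(headers: List[str]) -> List[str]:
--     # Pass 1: total occurrence count per header.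
--     total: dict[str, int] = {}
--     for h in headers:
--         total[h] = total.get(h, 0) + 1
--     # Pass 2: walk backwards, consuming counts, building the output back-to-front.
--     out: List[str] = []
--     for h in reversed(headers):
--         cnt = total[h]
--         total[h] = cnt - 1
--         out.append(h if cnt == 1 else f"{h}[{cnt}]")
--     out.reverse()
--     return out
-- ===== Notes on version B (the rewrite author's own statement) =====
-- stated objective: alternative
-- what changed: Replaces A's single forward pass with running per-header counts by a two-stage scheme: one pass precomputes total occurrence counts, then a reversed traversal consumes those counts downwards and builds the output back-to-front, reversing at the end.
import Mathlib
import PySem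

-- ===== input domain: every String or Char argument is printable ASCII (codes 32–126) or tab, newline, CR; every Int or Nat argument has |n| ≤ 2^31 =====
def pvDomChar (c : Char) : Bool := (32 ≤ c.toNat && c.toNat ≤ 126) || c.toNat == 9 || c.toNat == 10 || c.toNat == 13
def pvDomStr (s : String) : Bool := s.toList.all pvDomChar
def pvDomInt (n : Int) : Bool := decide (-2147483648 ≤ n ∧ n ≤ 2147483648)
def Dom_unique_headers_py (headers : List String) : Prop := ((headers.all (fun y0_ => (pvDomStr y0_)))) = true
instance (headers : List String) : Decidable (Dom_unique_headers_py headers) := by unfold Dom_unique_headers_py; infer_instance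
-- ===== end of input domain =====

-- B replaces A's forward running-count pass by a totals pass plus a reversed count-consuming pass
-- that builds the output back-to-front (alternative decomposition, not faster).

-- ===== PORT A =====
def unique_headers_py (headers : List String) : List String :=
  (headers.foldl
    (fun (st : PySem.Dict String Int × List String) h =>
      let cnt : Int := st.1.getD h 0 + 1
      let seen := st.1.insert h cnt
      if cnt == 1 then (seen, st.2 ++ [h])
      else (seen, st.2 ++ [h ++ "[" ++ PySem.Int.toStr cnt ++ "]"]))
    (PySem.Dict.empty, [])).2

-- ===== PORT B =====
-- the body of B's reversed loop (cnt = total[h]; total[h] = cnt - 1; append the tagged name)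
def pvBStep (st : PySem.Dict String Int × List String) (h : String) :
    PySem.Dict String Int × List String :=
  let cnt : Int := st.1.getD h 0
  (st.1.insert h (cnt - 1),
   st.2 ++ [if cnt == 1 then h else h ++ "[" ++ PySem.Int.toStr cnt ++ "]"])

def unique_headers_py_alt (headers : List String) : List String :=
  let total : PySem.Dict String Int :=
    headers.foldl (fun d h => d.insert h (d.getD h 0 + 1)) PySem.Dict.empty
  -- Python reads total[h]; the key is always present there, so getD _ 0 is exact.
  ((headers.reverse.foldl pvBStep (total, [])).2).reverse

-- ===== PRECONDITION & SPEC =====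
def Spec_unique_headers_py (headers : List String) (out : List String) : Prop := out = unique_headers_py_alt headers
instance (headers : List String) (out : List String) : Decidable (Spec_unique_headers_py headers out) := by unfold Spec_unique_headers_py; infer_instance

-- ===== CLAIM (what is proved, stated in full; the proofs are below) =====
def Claim_equal_unique_headers_py : Prop := ∀ (headers : List String), Dom_unique_headers_py headers → Spec_unique_headers_py headers (unique_headers_py headers)

-- ===== LEMMAS AND PROOFS =====

theorem pvMapIdx_ext {α β : Type} (l : List α) (f g : Nat → α → β)
    (h : ∀ i a, f i a = g i a) : l.mapIdx f = l.mapIdx g := by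
  induction l generalizing f g with
  | nil => rfl
  | cons x t ih => simp only [List.mapIdx_cons, h]; rw [ih _ _ (fun i a => h (i+1) a)]

-- the per-element renaming, parametrised by the running count
def pvTag (h : String) (cnt : Int) : String :=
  if cnt == 1 then h else h ++ "[" ++ PySem.Int.toStr cnt ++ "]"

-- A's loop, from an arbitrary dict state, appends pvTag with count (d.getD h 0 + prefix count + 1)
theorem pvA_loop (l : List String) (d : PySem.Dict String Int) (out : List String) :
    (l.foldl
      (fun (st : PySem.Dict String Int × List String) h =>
        let cnt : Int := st.1.getD h 0 + 1
        let seen := st.1.insert h cnt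
        if cnt == 1 then (seen, st.2 ++ [h])
        else (seen, st.2 ++ [h ++ "[" ++ PySem.Int.toStr cnt ++ "]"]))
      (d, out)).2
    = out ++ l.mapIdx (fun j h => pvTag h (d.getD h 0 + ((l.take j).count h : Int) + 1)) := by
  induction l generalizing d out with
  | nil => simp
  | cons h t ih =>
    simp only [List.foldl_cons, List.mapIdx_cons]
    have step : ∀ (j : Nat) (h' : String),
        (d.insert h (d.getD h 0 + 1)).getD h' 0 + ((t.take j).count h' : Int) + 1
        = d.getD h' 0 + (((h :: t).take (j+1)).count h' : Int) + 1 := by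
      intro j h'
      rw [PySem.Dict.getD_insert]
      by_cases hc : h' = h
      · subst hc; simp; ring
      · simp [hc, Ne.symm hc]
    have hmap : List.mapIdx (fun j h' => pvTag h' ((d.insert h (d.getD h 0 + 1)).getD h' 0 + ((t.take j).count h' : Int) + 1)) t
        = List.mapIdx (fun j h' => pvTag h' (d.getD h' 0 + (((h :: t).take (j+1)).count h' : Int) + 1)) t :=
      pvMapIdx_ext t _ _ (fun j h' => by rw [step])
    by_cases hc : (d.getD h 0 + 1 == 1) = true
    · rw [if_pos hc, ih, hmap]
      simp [pvTag, hc]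
    · rw [if_neg hc, ih, hmap]
      simp [pvTag, hc]

-- B's first pass: the totals dict holds each key's count (plus whatever the start dict held)
theorem pvB_totals (l : List String) (d : PySem.Dict String Int) (h' : String) :
    (l.foldl (fun d h => d.insert h (d.getD h 0 + 1)) d).getD h' 0
      = d.getD h' 0 + (l.count h' : Int) := by
  induction l generalizing d with
  | nil => simp
  | cons h t ih =>
    simp only [List.foldl_cons]
    rw [ih, PySem.Dict.getD_insert]
    by_cases hc : h' = h
    · subst hc; simp; ring
    · simp [hc, Ne.symm hc]

-- B's reversed loop, from an arbitrary dict state: the accumulated output is the reversed tags,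
-- each element tagged with (its d-count minus the count of it strictly after its position)
theorem pvB_loop (l : List String) (d : PySem.Dict String Int) (out : List String) :
    (l.reverse.foldl pvBStep (d, out)).2
      = out ++ (l.mapIdx (fun j h => pvTag h (d.getD h 0 - ((l.drop (j+1)).count h : Int)))).reverse
    ∧ ∀ h', ((l.reverse.foldl pvBStep (d, out)).1).getD h' 0
      = d.getD h' 0 - (l.count h' : Int) := by
  rw [List.foldl_reverse]
  induction l generalizing d out with
  | nil => simp
  | cons h t ih =>
    obtain ⟨ihOut, ihD⟩ := ih d out
    rw [List.foldr_cons]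
    generalize hres : List.foldr (fun x y => pvBStep y x) (d, out) t = res at ihOut ihD ⊢
    obtain ⟨D, O⟩ := res
    dsimp only at ihOut ihD
    constructor
    · simp only [pvBStep]
      rw [ihD h, ihOut]
      simp [pvTag, List.mapIdx_cons, List.append_assoc]
    · intro h'
      simp only [pvBStep]
      rw [PySem.Dict.getD_insert]
      by_cases hc : h' = h
      · subst hc
        rw [if_pos rfl, ihD h', List.count_cons_self]
        push_cast; ring
      · rw [if_neg hc, ihD h']
        simp [Ne.symm hc]

theorem unique_headers_py_spec' (headers : List String) :
    unique_headers_py headers = unique_headers_py_alt headers := by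
  simp only [unique_headers_py, unique_headers_py_alt]
  rw [pvA_loop, (pvB_loop headers _ []).1]
  simp only [List.nil_append, List.reverse_reverse]
  apply List.ext_getElem
  · simp
  · intro k hk hk2
    simp only [List.getElem_mapIdx]
    congr 1
    rw [pvB_totals, PySem.Dict.getD_empty]
    have hk' : k < headers.length := by simpa using hk
    have hsplit : List.count headers[k] headers =
        List.count headers[k] (headers.take (k+1)) + List.count headers[k] (headers.drop (k+1)) := by
      rw [← List.count_append, List.take_append_drop]
    have htake : List.count headers[k] (headers.take (k+1)) = List.count headers[k] (headers.take k) + 1 := by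
      rw [List.take_add_one, List.getElem?_eq_getElem hk', Option.toList_some, List.count_append]
      simp
    omega

-- ===== VERDICT (by name: the statement is the Claim_ definition above) =====
theorem unique_headers_py_spec : Claim_equal_unique_headers_py := by
  intro headers _
  exact unique_headers_py_spec' headers
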